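-- pv_equiv track=rewrite | github.com/frontloss/GPU_Validation_Infrastructure | DisplayAutomation2.0/Tests/FlipQ/flipq_helper.py | get_first_and_last_entry
-- ===== SOURCE A (Python) =====
-- from collections import OrderedDict
--
-- NO_OF_LAYERS = 3
--
-- def get_first_and_last_entry(flip_data, notify_data):
--     flip_layers = OrderedDict()
--     notify_layers = OrderedDict()
--
--     ##
--     # Get starting present id for each layer in ETL for flip data
--     for layer_index in range(0, NO_OF_LAYERS):
--         for present_id in flip_data:
--             if layer_index == flip_data[present_id]["PlaneInfo"][0][1]:
--                 flip_layers[layer_index] = []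
--                 flip_layers[layer_index].append(present_id)
--                 break
--
--     ##
--     # Get last present id for each layer in ETL for flip data
--     for layer_index in range(0, NO_OF_LAYERS):
--         for present_id in reversed(flip_data):
--             if layer_index == flip_data[present_id]["PlaneInfo"][0][1]:
--                 flip_layers[layer_index].append(present_id)
--                 break
--
--     ##
--     # Get starting present id for each layer in ETL for notify data
--     for layer_index in range(0, NO_OF_LAYERS):
--         for present_id in notify_data:
--             if layer_index == notify_data[present_id][0]:
--                 notify_layers[layer_index] = []
--                 notify_layers[layer_index].append(present_id)
--                 break
--
--     ##
--     # Get last present id for each layer in ETL for notify data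
--     for layer_index in range(0, NO_OF_LAYERS):
--         for present_id in reversed(notify_data):
--             if layer_index == notify_data[present_id][0]:
--                 notify_layers[layer_index].append(present_id)
--                 break
--
--     return flip_layers, notify_layers
-- ===== SOURCE B (Python) =====
-- from collections import OrderedDict
--
-- NO_OF_LAYERS = 3
--
-- def get_first_and_last_entry(flip_data, notify_data):
--     ##
--     # One forward pass per input: record (first, last) present_id per layer.
--     flip_span = {}
--     for present_id, info in flip_data.items():
--         layer = info["PlaneInfo"][0][1]
--         if layer in flip_span:
--             flip_span[layer] = (flip_span[layer][0], present_id)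
--         else:
--             flip_span[layer] = (present_id, present_id)
--
--     notify_span = {}
--     for present_id, data in notify_data.items():
--         layer = data[0]
--         if layer in notify_span:
--             notify_span[layer] = (notify_span[layer][0], present_id)
--         else:
--             notify_span[layer] = (present_id, present_id)
--
--     ##
--     # Emit layers in ascending index order, skipping absent ones.
--     flip_layers = OrderedDict()
--     for layer_index in range(NO_OF_LAYERS):
--         if layer_index in flip_span:
--             first, last = flip_span[layer_index]
--             flip_layers[layer_index] = [first, last]
--
--     notify_layers = OrderedDict()
--     for layer_index in range(NO_OF_LAYERS):
--         if layer_index in notify_span: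
--             first, last = notify_span[layer_index]
--             notify_layers[layer_index] = [first, last]
--     return flip_layers, notify_layers
-- ===== Notes on version B (the rewrite author's own statement) =====
-- stated objective: faster
-- what changed: Replaces A's six full scans (three layers x forward and backward, for each of the two dicts) with one single forward pass per dict that maintains a layer->(first,last) map, then one ascending emit loop over the three layer indices.
import Mathlib
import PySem

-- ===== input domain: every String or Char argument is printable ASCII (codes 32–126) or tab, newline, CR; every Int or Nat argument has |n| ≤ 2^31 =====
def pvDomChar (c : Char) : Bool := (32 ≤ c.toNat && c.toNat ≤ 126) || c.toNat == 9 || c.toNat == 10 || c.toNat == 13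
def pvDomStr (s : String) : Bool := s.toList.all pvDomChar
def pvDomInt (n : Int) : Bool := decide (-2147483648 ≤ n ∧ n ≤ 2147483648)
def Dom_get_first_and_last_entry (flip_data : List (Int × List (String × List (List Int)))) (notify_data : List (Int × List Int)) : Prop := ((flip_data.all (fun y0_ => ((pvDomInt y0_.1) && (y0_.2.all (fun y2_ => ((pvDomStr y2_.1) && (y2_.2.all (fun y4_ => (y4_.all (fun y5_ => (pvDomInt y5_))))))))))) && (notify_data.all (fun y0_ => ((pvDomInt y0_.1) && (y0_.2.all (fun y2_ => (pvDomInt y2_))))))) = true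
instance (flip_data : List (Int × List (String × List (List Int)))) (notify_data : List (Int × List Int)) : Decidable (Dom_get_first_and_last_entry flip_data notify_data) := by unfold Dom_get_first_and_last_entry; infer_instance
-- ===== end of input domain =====

-- B replaces A's six layer-by-layer rescans with one forward pass per dict plus an ascending emit loop (objective: faster, constant factor).

-- ===== PORT A =====
-- flip_data[pid]["PlaneInfo"][0][1]  (total here; Pre_ guarantees every lookup succeeds where Python evaluates it)
def pvLayerOf (v : List (String × List (List Int))) : Int :=
  (PySem.List.pyGet? ((PySem.List.pyGet? ((PySem.Dict.ofList v).getD "PlaneInfo" []) 0).getD []) 1).getD 0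

-- notify_data[pid][0]
def pvNotifyLayer (l : List Int) : Int := (PySem.List.pyGet? l 0).getD 0

def get_first_and_last_entry (flip_data : List (Int × List (String × List (List Int)))) (notify_data : List (Int × List Int)) : (List (Int × List Int)) × (List (Int × List Int)) :=
  let fd := PySem.Dict.ofList flip_data
  let nd := PySem.Dict.ofList notify_data
  -- first present id per layer, flip data
  let flip1 := (PySem.List.pyRange 0 3 1).foldl (fun d li =>
    match fd.keys.find? (fun pid => li == pvLayerOf (fd.getD pid [])) with
    | some pid => (d.insert li []).modify li [] (fun s => s ++ [pid])
    | none => d) PySem.Dict.empty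
  -- last present id per layer, flip data (reversed scan)
  let flip2 := (PySem.List.pyRange 0 3 1).foldl (fun d li =>
    match fd.keys.reverse.find? (fun pid => li == pvLayerOf (fd.getD pid [])) with
    | some pid => d.modify li [] (fun s => s ++ [pid])
    | none => d) flip1
  -- first present id per layer, notify data
  let not1 := (PySem.List.pyRange 0 3 1).foldl (fun d li =>
    match nd.keys.find? (fun pid => li == pvNotifyLayer (nd.getD pid [])) with
    | some pid => (d.insert li []).modify li [] (fun s => s ++ [pid])
    | none => d) PySem.Dict.empty
  -- last present id per layer, notify data (reversed scan)
  let not2 := (PySem.List.pyRange 0 3 1).foldl (fun d li =>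
    match nd.keys.reverse.find? (fun pid => li == pvNotifyLayer (nd.getD pid [])) with
    | some pid => d.modify li [] (fun s => s ++ [pid])
    | none => d) not1
  (flip2.items, not2.items)

-- ===== PORT B =====
def get_first_and_last_entry_alt (flip_data : List (Int × List (String × List (List Int)))) (notify_data : List (Int × List Int)) : (List (Int × List Int)) × (List (Int × List Int)) :=
  let fd := PySem.Dict.ofList flip_data
  let nd := PySem.Dict.ofList notify_data
  -- one forward pass: layer -> (first, last) present id
  let fspan := fd.items.foldl (fun d p =>
    match d.get? (pvLayerOf p.2) with
    | some q => d.insert (pvLayerOf p.2) (q.1, p.1)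
    | none => d.insert (pvLayerOf p.2) (p.1, p.1)) PySem.Dict.empty
  let nspan := nd.items.foldl (fun d p =>
    match d.get? (pvNotifyLayer p.2) with
    | some q => d.insert (pvNotifyLayer p.2) (q.1, p.1)
    | none => d.insert (pvNotifyLayer p.2) (p.1, p.1)) PySem.Dict.empty
  -- emit in ascending layer order, skipping absent layers
  let flip_layers := (PySem.List.pyRange 0 3 1).foldl (fun d li =>
    match fspan.get? li with
    | some q => d.insert li [q.1, q.2]
    | none => d) PySem.Dict.empty
  let notify_layers := (PySem.List.pyRange 0 3 1).foldl (fun d li =>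
    match nspan.get? li with
    | some q => d.insert li [q.1, q.2]
    | none => d) PySem.Dict.empty
  (flip_layers.items, notify_layers.items)

-- ===== PRECONDITION & SPEC =====
def pvWfInfo (v : List (String × List (List Int))) : Bool :=
  match (PySem.Dict.ofList v).get? "PlaneInfo" with
  | some (row :: _) => decide (2 ≤ row.length)
  | _ => false

-- Pre_ excludes inputs where Python A raises KeyError/IndexError on a malformed entry (no "PlaneInfo" key,
-- PlaneInfo[0][1] missing, empty notify list); on some inputs A's early-break scan order happens to skip such
-- an entry and A still returns — those are excluded too (B evaluates every entry and raises there, see cite).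
def Pre_get_first_and_last_entry (flip_data : List (Int × List (String × List (List Int)))) (notify_data : List (Int × List Int)) : Prop :=
  ((PySem.Dict.ofList flip_data).values.all pvWfInfo
    && (PySem.Dict.ofList notify_data).values.all (fun l => !l.isEmpty)) = true
instance (flip_data : List (Int × List (String × List (List Int)))) (notify_data : List (Int × List Int)) : Decidable (Pre_get_first_and_last_entry flip_data notify_data) := by unfold Pre_get_first_and_last_entry; infer_instance

def pvWitness_get_first_and_last_entry : (List (Int × List (String × List (List Int)))) × (List (Int × List Int)) :=
  ([(1, [("PlaneInfo", [[0, 0]])]), (2, [("PlaneInfo", [[0, 1]])])], [(5, [1]), (6, [0])])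

def Spec_get_first_and_last_entry (flip_data : List (Int × List (String × List (List Int)))) (notify_data : List (Int × List Int)) (out : (List (Int × List Int)) × (List (Int × List Int))) : Prop := out = get_first_and_last_entry_alt flip_data notify_data
instance (flip_data : List (Int × List (String × List (List Int)))) (notify_data : List (Int × List Int)) (out : (List (Int × List Int)) × (List (Int × List Int))) : Decidable (Spec_get_first_and_last_entry flip_data notify_data out) := by unfold Spec_get_first_and_last_entry; infer_instance

-- ===== CLAIM (what is proved, stated in full; the proofs are below) =====
def Claim_equal_get_first_and_last_entry : Prop := ∀ (flip_data : List (Int × List (String × List (List Int)))) (notify_data : List (Int × List Int)), Dom_get_first_and_last_entry flip_data notify_data → Pre_get_first_and_last_entry flip_data notify_data → Spec_get_first_and_last_entry flip_data notify_data (get_first_and_last_entry flip_data notify_data)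

-- ===== LEMMAS AND PROOFS =====

-- B's one-pass step, named for the proofs (definitionally the fold body of the ports of B)
def pvStep {α : Type} (g : α → Int) (d : PySem.Dict Int (Int × Int)) (p : Int × α) : PySem.Dict Int (Int × Int) :=
  match d.get? (g p.2) with
  | some q => d.insert (g p.2) (q.1, p.1)
  | none => d.insert (g p.2) (p.1, p.1)

-- forward and backward find? succeed together
lemma pvFind_isSome {α : Type} (l : List (Int × α)) (q : Int × α → Bool) :
    (l.find? q).isSome = (l.reverse.find? q).isSome := by
  rw [Bool.eq_iff_iff]
  simp [List.find?_isSome]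

-- B's single pass computes (first match, last match) for every layer
lemma pvScan_get? {α : Type} (g : α → Int) (l : List (Int × α)) :
    ∀ li : Int, (l.foldl (pvStep g) PySem.Dict.empty).get? li =
      (l.find? (fun p => li == g p.2)).bind (fun pf =>
        (l.reverse.find? (fun p => li == g p.2)).map (fun pl => (pf.1, pl.1))) := by
  induction l using List.reverseRecOn with
  | nil => intro li; rfl
  | append_singleton l p ih =>
    intro li
    rw [List.foldl_append, List.foldl_cons, List.foldl_nil]
    simp only [List.reverse_append, List.reverse_cons, List.reverse_nil, List.nil_append,
      List.cons_append, List.find?_append, List.find?_nil, List.find?_cons]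
    by_cases hk : li = g p.2
    · subst hk
      simp only [beq_self_eq_true]
      cases hD : (l.foldl (pvStep g) PySem.Dict.empty).get? (g p.2) with
      | none =>
        have hf : l.find? (fun x => g p.2 == g x.2) = none := by
          have hi := ih (g p.2); rw [hD] at hi
          have hs := pvFind_isSome l (fun x => g p.2 == g x.2)
          cases hf : l.find? (fun x => g p.2 == g x.2) with
          | none => rfl
          | some pf =>
            cases hr : l.reverse.find? (fun x => g p.2 == g x.2) with
            | none => rw [hf, hr] at hs; simp at hs
            | some pl => rw [hf, hr] at hi; simp at hi
        rw [hf]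
        simp [pvStep, hD, PySem.Dict.get?_insert_self]
      | some q =>
        have hi := ih (g p.2); rw [hD] at hi
        cases hf : l.find? (fun x => g p.2 == g x.2) with
        | none => rw [hf] at hi; simp at hi
        | some pf =>
          cases hr : l.reverse.find? (fun x => g p.2 == g x.2) with
          | none => rw [hf, hr] at hi; simp at hi
          | some pl =>
            rw [hf, hr] at hi
            simp only [Option.map_some, Option.bind_some, Option.some.injEq] at hi
            simp [pvStep, hD, PySem.Dict.get?_insert_self, hi]
    · have hb : (li == g p.2) = false := by simp [hk]
      simp only [hb]
      cases hD : (l.foldl (pvStep g) PySem.Dict.empty).get? (g p.2) <;>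
        · simp only [pvStep, hD]
          rw [PySem.Dict.get?_insert_of_ne _ _ hk, ih li]
          cases l.find? (fun x => li == g x.2) <;> simp

-- a scan over a key list with a per-key lookup is a scan over the pairs
lemma pvFind_keys {α : Type} (l : List (Int × α)) (f : Int → Bool) (q : Int × α → Bool)
    (hq : ∀ p ∈ l, f p.1 = q p) :
    (l.map Prod.fst).find? f = (l.find? q).map Prod.fst := by
  induction l with
  | nil => rfl
  | cons p t ih =>
    simp only [List.map_cons, List.find?_cons]
    rw [hq p (by simp)]
    cases hqp : q p
    · exact ih (fun x hx => hq x (by simp [hx]))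
    · simp

-- A's key scans over a dict built by ofList, rewritten to items scans (flip side)
lemma pvKeysFind_flip (flip_data : List (Int × List (String × List (List Int)))) (li : Int) :
    (PySem.Dict.ofList flip_data).keys.find?
        (fun pid => li == pvLayerOf ((PySem.Dict.ofList flip_data).getD pid [])) =
      ((PySem.Dict.ofList flip_data).items.find? (fun p => li == pvLayerOf p.2)).map Prod.fst := by
  have hnd := PySem.Dict.nodup_keys_ofList flip_data
  rw [show (PySem.Dict.ofList flip_data).keys = (PySem.Dict.ofList flip_data).items.map Prod.fst from rfl]
  exact pvFind_keys _ _ _ (fun p hp => by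
    rw [PySem.Dict.getD_of_mem_items _ (by simpa using hp) hnd])

lemma pvKeysFindRev_flip (flip_data : List (Int × List (String × List (List Int)))) (li : Int) :
    (PySem.Dict.ofList flip_data).keys.reverse.find?
        (fun pid => li == pvLayerOf ((PySem.Dict.ofList flip_data).getD pid [])) =
      ((PySem.Dict.ofList flip_data).items.reverse.find? (fun p => li == pvLayerOf p.2)).map Prod.fst := by
  have hnd := PySem.Dict.nodup_keys_ofList flip_data
  rw [show (PySem.Dict.ofList flip_data).keys = (PySem.Dict.ofList flip_data).items.map Prod.fst from rfl,
    ← List.map_reverse]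
  exact pvFind_keys _ _ _ (fun p hp => by
    rw [PySem.Dict.getD_of_mem_items _ (by simpa using (List.mem_reverse.mp hp)) hnd])

-- same, notify side
lemma pvKeysFind_notify (notify_data : List (Int × List Int)) (li : Int) :
    (PySem.Dict.ofList notify_data).keys.find?
        (fun pid => li == pvNotifyLayer ((PySem.Dict.ofList notify_data).getD pid [])) =
      ((PySem.Dict.ofList notify_data).items.find? (fun p => li == pvNotifyLayer p.2)).map Prod.fst := by
  have hnd := PySem.Dict.nodup_keys_ofList notify_data
  rw [show (PySem.Dict.ofList notify_data).keys = (PySem.Dict.ofList notify_data).items.map Prod.fst from rfl]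
  exact pvFind_keys _ _ _ (fun p hp => by
    rw [PySem.Dict.getD_of_mem_items _ (by simpa using hp) hnd])

lemma pvKeysFindRev_notify (notify_data : List (Int × List Int)) (li : Int) :
    (PySem.Dict.ofList notify_data).keys.reverse.find?
        (fun pid => li == pvNotifyLayer ((PySem.Dict.ofList notify_data).getD pid [])) =
      ((PySem.Dict.ofList notify_data).items.reverse.find? (fun p => li == pvNotifyLayer p.2)).map Prod.fst := by
  have hnd := PySem.Dict.nodup_keys_ofList notify_data
  rw [show (PySem.Dict.ofList notify_data).keys = (PySem.Dict.ofList notify_data).items.map Prod.fst from rfl,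
    ← List.map_reverse]
  exact pvFind_keys _ _ _ (fun p hp => by
    rw [PySem.Dict.getD_of_mem_items _ (by simpa using (List.mem_reverse.mp hp)) hnd])

-- the per-dict equivalence: A's four-scan construction equals B's pass-then-emit construction
lemma pvDict_eq {α : Type} (g : α → Int) (l : List (Int × α)) :
    ((PySem.List.pyRange 0 3 1).foldl (fun d li =>
        match (l.reverse.find? (fun p => li == g p.2)).map Prod.fst with
        | some pid => d.modify li [] (fun s => s ++ [pid])
        | none => d)
      ((PySem.List.pyRange 0 3 1).foldl (fun d li =>
        match (l.find? (fun p => li == g p.2)).map Prod.fst with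
        | some pid => (d.insert li []).modify li [] (fun s => s ++ [pid])
        | none => d) PySem.Dict.empty)) =
    ((PySem.List.pyRange 0 3 1).foldl (fun d li =>
        match (l.foldl (pvStep g) PySem.Dict.empty).get? li with
        | some q => d.insert li [q.1, q.2]
        | none => d) PySem.Dict.empty) := by
  have hr : PySem.List.pyRange 0 3 1 = [0, 1, 2] := by decide
  simp only [hr, List.foldl_cons, List.foldl_nil, pvScan_get?]
  have h0 := pvFind_isSome l (fun p => (0 : Int) == g p.2)
  have h1 := pvFind_isSome l (fun p => (1 : Int) == g p.2)
  have h2 := pvFind_isSome l (fun p => (2 : Int) == g p.2)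
  rcases hf0 : l.find? (fun p => (0 : Int) == g p.2) with _ | f0 <;>
    rcases hr0 : l.reverse.find? (fun p => (0 : Int) == g p.2) with _ | r0 <;>
    rw [hf0, hr0] at h0 <;> simp at h0
  all_goals
    rcases hf1 : l.find? (fun p => (1 : Int) == g p.2) with _ | f1 <;>
      rcases hr1 : l.reverse.find? (fun p => (1 : Int) == g p.2) with _ | r1 <;>
      rw [hf1, hr1] at h1 <;> simp at h1
  all_goals
    rcases hf2 : l.find? (fun p => (2 : Int) == g p.2) with _ | f2 <;>
      rcases hr2 : l.reverse.find? (fun p => (2 : Int) == g p.2) with _ | r2 <;>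
      rw [hf2, hr2] at h2 <;> simp at h2
  all_goals simp only [hf0, hr0, hf1, hr1, hf2, hr2]
  all_goals rfl

-- ===== VERDICT (by name: the statement is the Claim_ definition above) =====
theorem get_first_and_last_entry_spec : Claim_equal_get_first_and_last_entry := by
  intro flip_data notify_data _ _
  unfold Spec_get_first_and_last_entry
  simp only [get_first_and_last_entry, get_first_and_last_entry_alt,
    pvKeysFind_flip, pvKeysFindRev_flip, pvKeysFind_notify, pvKeysFindRev_notify]
  exact congrArg₂ Prod.mk
    (congrArg PySem.Dict.items (pvDict_eq pvLayerOf (PySem.Dict.ofList flip_data).items))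
    (congrArg PySem.Dict.items (pvDict_eq pvNotifyLayer (PySem.Dict.ofList notify_data).items))
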